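-- pv_equiv track=rewrite | github.com/yeonsr/ts-repair | code/evaluation/evaluate.py | _pairwise_counts
-- ===== SOURCE A (Python) =====
-- from typing import Dict, List, Optional, Tuple
--
-- def _pairwise_counts(order: List[int]) -> Tuple[int, int]:
--     total = 0
--     correct = 0
--     pos = {rid: i for i, rid in enumerate(order)}
--     sorted_ids = sorted(order)
--
--     for i in range(len(sorted_ids)):
--         for j in range(i + 1, len(sorted_ids)):
--             a = sorted_ids[i]
--             b = sorted_ids[j]
--             total += 1
--             if pos[a] < pos[b]:
--                 correct += 1
--
--     return correct, total
-- ===== SOURCE B (Python) =====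
-- def _pairwise_counts(order):
--     # merge-sort count of non-inverted pairs on the position sequence of the sorted values
--     pos = {rid: i for i, rid in enumerate(order)}
--     s = [pos[v] for v in sorted(order)]
--
--     def msort(l):
--         if len(l) <= 1:
--             return l, 0
--         m = len(l) // 2
--         left, cl = msort(l[:m])
--         right, cr = msort(l[m:])
--         merged = []
--         cm = 0
--         i = 0
--         j = 0
--         while i < len(left) and j < len(right):
--             if left[i] < right[j]:
--                 cm += len(right) - j
--                 merged.append(left[i])
--                 i += 1
--             else:
--                 merged.append(right[j])
--                 j += 1
--         merged.extend(left[i:])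
--         merged.extend(right[j:])
--         return merged, cl + cr + cm
--
--     correct = msort(s)[1]
--     n = len(order)
--     return correct, n * (n - 1) // 2
-- ===== Notes on version B (the rewrite author's own statement) =====
-- stated objective: faster
-- what changed: Replaces the O(n^2) double index loop over all sorted pairs by a merge-sort that counts non-inverted pairs of the position sequence in O(n log n), with total computed in closed form as n*(n-1)//2.
import Mathlib
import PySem

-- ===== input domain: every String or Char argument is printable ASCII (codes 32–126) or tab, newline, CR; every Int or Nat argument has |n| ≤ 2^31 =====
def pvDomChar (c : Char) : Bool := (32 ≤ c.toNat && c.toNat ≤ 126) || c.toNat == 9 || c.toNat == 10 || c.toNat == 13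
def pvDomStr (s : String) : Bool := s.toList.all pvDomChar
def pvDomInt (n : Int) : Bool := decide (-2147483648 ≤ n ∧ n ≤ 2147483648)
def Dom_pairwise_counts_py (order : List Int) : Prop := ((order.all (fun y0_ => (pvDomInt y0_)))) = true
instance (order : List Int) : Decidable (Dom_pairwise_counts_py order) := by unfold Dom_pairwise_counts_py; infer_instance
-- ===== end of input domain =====

-- B replaces A's O(n^2) double index loop by a merge-sort count of the non-inverted
-- pairs of the position sequence, with the pair total in closed form (objective: faster).

-- ===== PORT A =====
-- pos[a] / pos[b]: the keys looked up are elements of order, so the lookup never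
-- raises KeyError; it is ported as .getD 0 (the default is never used).
def pairwise_counts_py (order : List Int) : Int × Int :=
  let pos : PySem.Dict Int Int :=
    (PySem.List.enumerate order).foldl (fun d p => d.insert p.2 p.1) PySem.Dict.empty
  let sorted_ids := PySem.List.sorted order (fun x => x) false
  let n : Int := sorted_ids.length
  let tc :=
    (PySem.List.pyRange 0 n 1).foldl (fun tc i =>
      (PySem.List.pyRange (i + 1) n 1).foldl (fun tc j =>
        let a := PySem.List.pyGetD sorted_ids i 0
        let b := PySem.List.pyGetD sorted_ids j 0
        let total := tc.1 + 1
        let correct := if (pos.get? a).getD 0 < (pos.get? b).getD 0 then tc.2 + 1 else tc.2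
        (total, correct)) tc) ((0 : Int), (0 : Int))
  (tc.2, tc.1)

-- ===== PORT B =====
-- the merge while-loop of Source B: it consumes the two sorted runs from the front and,
-- for each element taken from the left run, adds the remaining length of the right run
def pvMergeCount : List Int → List Int → List Int × Int
  | [], r => (r, 0)
  | x :: l, [] => (x :: l, 0)
  | x :: l, y :: r =>
    if x < y then
      let p := pvMergeCount l (y :: r)
      (x :: p.1, p.2 + ((y :: r).length : Int))
    else
      let p := pvMergeCount (x :: l) r
      (y :: p.1, p.2)
  termination_by l r => l.length + r.length

-- msort of Source B: split in half, recurse, merge counting the cross pairs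
def pvMsortCount (l : List Int) : List Int × Int :=
  if _h : l.length ≤ 1 then (l, 0)
  else
    let m := l.length / 2
    let a := pvMsortCount (l.take m)
    let b := pvMsortCount (l.drop m)
    let c := pvMergeCount a.1 b.1
    (c.1, a.2 + b.2 + c.2)
  termination_by l.length
  decreasing_by
  · simp only [List.length_take]; omega
  · simp only [List.length_drop]; omega

def pairwise_counts_py_alt (order : List Int) : Int × Int :=
  let pos : PySem.Dict Int Int :=
    (PySem.List.enumerate order).foldl (fun d p => d.insert p.2 p.1) PySem.Dict.empty
  let s := (PySem.List.sorted order (fun x => x) false).map (fun v => (pos.get? v).getD 0)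
  let correct := (pvMsortCount s).2
  let n : Int := order.length
  (correct, PySem.Int.floordiv (n * (n - 1)) 2)

-- ===== PRECONDITION & SPEC =====
def Spec_pairwise_counts_py (order : List Int) (out : Int × Int) : Prop := out = pairwise_counts_py_alt order
instance (order : List Int) (out : Int × Int) : Decidable (Spec_pairwise_counts_py order out) := by unfold Spec_pairwise_counts_py; infer_instance

-- ===== CLAIM (what is proved, stated in full; the proofs are below) =====
def Claim_equal_pairwise_counts_py : Prop := ∀ (order : List Int), Dom_pairwise_counts_py order → Spec_pairwise_counts_py order (pairwise_counts_py order)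

-- ===== LEMMAS AND PROOFS =====

-- number of pairs i < j with s[i] < s[j], written structurally
def pvNdp : List Int → Int
  | [] => 0
  | x :: xs => ((xs.countP (fun y => decide (x < y))) : Int) + pvNdp xs

-- number of cross pairs (a from L, b from R) with a < b
def pvCross (L R : List Int) : Int :=
  (L.map (fun a => ((R.countP (fun b => decide (a < b))) : Int))).sum

theorem pvNdp_append (L R : List Int) :
    pvNdp (L ++ R) = pvNdp L + pvNdp R + pvCross L R := by
  induction L with
  | nil => simp [pvNdp, pvCross]
  | cons x L ih =>
    simp only [List.cons_append, pvNdp, List.countP_append, ih, pvCross, List.map_cons, List.sum_cons]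
    push_cast
    ring

theorem pvCross_perm_left {L L' : List Int} (h : L.Perm L') (R : List Int) :
    pvCross L R = pvCross L' R := by
  unfold pvCross
  exact (h.map _).sum_eq

theorem pvCross_perm_right (L : List Int) {R R' : List Int} (h : R.Perm R') :
    pvCross L R = pvCross L R' := by
  unfold pvCross
  congr 1
  exact List.map_congr_left fun a _ => by rw [h.countP_eq]

theorem pvCross_cons_right (L : List Int) (y : Int) (R : List Int) :
    pvCross L (y :: R) = ((L.countP (fun a => decide (a < y)) : Nat) : Int) + pvCross L R := by
  induction L with
  | nil => simp [pvCross]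
  | cons x L ih =>
    simp only [pvCross, List.map_cons, List.sum_cons, List.countP_cons] at *
    rw [ih]
    by_cases h : x < y <;> simp [h] <;> omega

theorem pvMergeCount_perm (L R : List Int) : (pvMergeCount L R).1.Perm (L ++ R) := by
  fun_induction pvMergeCount with
  | case1 r => simp
  | case2 x l => simp
  | case3 x l y r h p ih => simpa [p] using ih.cons x
  | case4 x l y r h p ih =>
    refine ((ih.cons y).trans ?_ : (y :: p.1).Perm _)
    exact (List.perm_middle.symm.trans (by simp))

theorem pvMergeCount_sorted {L R : List Int} (hL : L.Pairwise (· ≤ ·)) (hR : R.Pairwise (· ≤ ·)) :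
    (pvMergeCount L R).1.Pairwise (· ≤ ·) := by
  fun_induction pvMergeCount with
  | case1 r => exact hR
  | case2 x l => exact hL
  | case3 x l y r h p ih =>
    refine List.Pairwise.cons ?_ (ih hL.of_cons hR)
    intro z hz
    have hz' := (pvMergeCount_perm l (y :: r)).mem_iff.mp hz
    rcases List.mem_append.mp hz' with h1 | h1
    · exact (List.pairwise_cons.mp hL).1 _ h1
    · rcases List.mem_cons.mp h1 with rfl | h2
      · exact le_of_lt h
      · exact (le_of_lt h).trans ((List.pairwise_cons.mp hR).1 _ h2)
  | case4 x l y r h p ih =>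
    refine List.Pairwise.cons ?_ (ih hL hR.of_cons)
    intro z hz
    have hz' := (pvMergeCount_perm (x :: l) r).mem_iff.mp hz
    have hyx : y ≤ x := le_of_not_gt h
    rcases List.mem_append.mp hz' with h1 | h1
    · rcases List.mem_cons.mp h1 with rfl | h2
      · exact hyx
      · exact hyx.trans ((List.pairwise_cons.mp hL).1 _ h2)
    · exact (List.pairwise_cons.mp hR).1 _ h1

theorem pvMergeCount_count {L R : List Int} (hL : L.Pairwise (· ≤ ·)) (hR : R.Pairwise (· ≤ ·)) :
    (pvMergeCount L R).2 = pvCross L R := by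
  fun_induction pvMergeCount with
  | case1 r => simp [pvCross]
  | case2 x l => simp [pvCross]
  | case3 x l y r h p ih =>
    show p.2 + ((y :: r).length : Int) = _
    rw [ih hL.of_cons hR]
    have hcnt : (y :: r).countP (fun b => decide (x < b)) = (y :: r).length := by
      rw [List.countP_eq_length]
      intro b hb
      rcases List.mem_cons.mp hb with rfl | h2
      · simpa using h
      · simpa using h.trans_le ((List.pairwise_cons.mp hR).1 _ h2)
    simp only [pvCross, List.map_cons, List.sum_cons, hcnt]
    ring
  | case4 x l y r h p ih =>
    show p.2 = _
    rw [ih hL hR.of_cons, pvCross_cons_right]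
    have hcnt : (x :: l).countP (fun a => decide (a < y)) = 0 := by
      rw [List.countP_eq_zero]
      intro a ha
      have hyx : y ≤ x := le_of_not_gt h
      rcases List.mem_cons.mp ha with rfl | h2
      · simpa using not_lt_of_ge hyx
      · simpa using not_lt_of_ge (hyx.trans ((List.pairwise_cons.mp hL).1 _ h2))
    simp [hcnt]

theorem pvMsortCount_perm (l : List Int) : (pvMsortCount l).1.Perm l := by
  fun_induction pvMsortCount with
  | case1 l h => exact List.Perm.refl l
  | case2 l h m a b c iha ihb =>
    show c.1.Perm l
    refine (pvMergeCount_perm a.1 b.1).trans ?_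
    exact (iha.append ihb).trans (by rw [List.take_append_drop] : (l.take m ++ l.drop m).Perm l)

theorem pvMsortCount_sorted (l : List Int) : (pvMsortCount l).1.Pairwise (· ≤ ·) := by
  fun_induction pvMsortCount with
  | case1 l h =>
    match l, h with
    | [], _ => simp
    | [x], _ => simp
    | x :: y :: t, h => simp at h
  | case2 l h m a b c iha ihb => exact pvMergeCount_sorted iha ihb

theorem pvMsortCount_count (l : List Int) : (pvMsortCount l).2 = pvNdp l := by
  fun_induction pvMsortCount with
  | case1 l h =>
    match l, h with
    | [], _ => simp [pvNdp]
    | [x], _ => simp [pvNdp]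
    | x :: y :: t, h => simp at h
  | case2 l h m a b c iha ihb =>
    show a.2 + b.2 + c.2 = pvNdp l
    have hc : c.2 = pvCross (l.take m) (l.drop m) := by
      rw [(rfl : c = pvMergeCount a.1 b.1)]
      rw [pvMergeCount_count (pvMsortCount_sorted _) (pvMsortCount_sorted _)]
      rw [pvCross_perm_left (pvMsortCount_perm (l.take m)).symm,
          pvCross_perm_right _ (pvMsortCount_perm (l.drop m)).symm]
    rw [iha, ihb, hc, ← pvNdp_append, List.take_append_drop]

-- a fold of the pair state (total, correct): total += 1, correct += [p v]
theorem pvFoldPair (l : List Int) (p : Int → Prop) [DecidablePred p] (t c : Int) :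
    l.foldl (fun tc v => (tc.1 + 1, if p v then tc.2 + 1 else tc.2)) (t, c)
      = (t + (l.length : Int), c + ((l.countP (fun v => decide (p v)) : Nat) : Int)) := by
  induction l generalizing t c with
  | nil => simp
  | cons x l ih =>
    simp only [List.foldl_cons, List.length_cons, List.countP_cons]
    by_cases h : p x <;> simp [h, ih, Prod.ext_iff] <;> omega

-- A's nested index loops from index k on compute (C(n-k,2), pvNdp of the value sequence)
theorem pvOuter (n : Int) (g : Int → Int) (k t c : Int) :
    (PySem.List.pyRange k n 1).foldl (fun tc i =>
      (PySem.List.pyRange (i + 1) n 1).foldl (fun tc j =>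
        (tc.1 + 1, if g i < g j then tc.2 + 1 else tc.2)) tc) (t, c)
    = (t + (((n - k).toNat.choose 2 : Nat) : Int), c + pvNdp ((PySem.List.pyRange k n 1).map g)) := by
  by_cases hnk : n ≤ k
  · rw [PySem.List.pyRange_one_eq_nil hnk]
    have : (n - k).toNat = 0 := by omega
    simp [this, pvNdp]
  · push Not at hnk
    rw [PySem.List.pyRange_one_cons hnk]
    simp only [List.foldl_cons, List.map_cons]
    have hinner :
        (PySem.List.pyRange (k + 1) n 1).foldl (fun tc j =>
          (tc.1 + 1, if g k < g j then tc.2 + 1 else tc.2)) (t, c)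
        = (t + (((n - (k+1)).toNat : Nat) : Int),
           c + ((((PySem.List.pyRange (k + 1) n 1).map g).countP (fun v => decide (g k < v)) : Nat) : Int)) := by
      rw [← List.foldl_map (f := g) (g := fun (tc : Int × Int) v => (tc.1 + 1, if g k < v then tc.2 + 1 else tc.2)) (l := PySem.List.pyRange (k+1) n 1) (init := (t, c))]
      rw [pvFoldPair]
      simp [PySem.List.length_pyRange_one]
    rw [hinner, pvOuter n g (k + 1)]
    have hchoose : (n - k).toNat.choose 2 = (n - (k+1)).toNat + (n - (k+1)).toNat.choose 2 := by
      have h1 : (n - k).toNat = (n - (k+1)).toNat + 1 := by omega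
      rw [h1, Nat.choose_succ_succ]
      simp [Nat.choose_one_right]
    rw [Prod.mk.injEq]
    constructor
    · rw [hchoose]; push_cast; ring
    · show _ = c + pvNdp (g k :: (PySem.List.pyRange (k+1) n 1).map g)
      simp only [pvNdp]
      ring
termination_by (n - k).toNat
decreasing_by omega

theorem pvChooseTwo (L : Nat) :
    ((L.choose 2 : Nat) : Int) = PySem.Int.floordiv ((L : Int) * ((L : Int) - 1)) 2 := by
  cases L with
  | zero => decide
  | succ m =>
    have h1 : ((m + 1 : Nat) : Int) * (((m + 1 : Nat) : Int) - 1) = (((m + 1) * m : Nat) : Int) := by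
      push_cast; ring
    have h2 : PySem.Int.floordiv (((m + 1) * m : Nat) : Int) 2 = (((m + 1) * m / 2 : Nat) : Int) := by
      exact_mod_cast PySem.Int.floordiv_natCast ((m + 1) * m) 2
    rw [h1, h2, Nat.choose_two_right]
    norm_num

-- '[f(pyGetD s i) for i in range(len(s))]' is 's.map f'
theorem pvMapIdx (sorted : List Int) (f : Int → Int) :
    (PySem.List.pyRange 0 (sorted.length : Int) 1).map (fun i => f (PySem.List.pyGetD sorted i 0))
      = sorted.map f := by
  have h : (fun i => f (PySem.List.pyGetD sorted i 0))
      = f ∘ (fun i => PySem.List.pyGetD sorted i 0) := rfl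
  rw [h, ← List.map_map, PySem.List.map_pyGetD_pyRange_zero']

theorem pvAB_eq (order : List Int) :
    pairwise_counts_py order = pairwise_counts_py_alt order := by
  unfold pairwise_counts_py pairwise_counts_py_alt
  simp only []
  rw [pvOuter ((PySem.List.sorted order (fun x => x) false).length : Int)
        (fun i => ((((PySem.List.enumerate order).foldl (fun d p => d.insert p.2 p.1) PySem.Dict.empty).get?
          (PySem.List.pyGetD (PySem.List.sorted order (fun x => x) false) i 0)).getD 0)) 0 0 0]
  rw [pvMsortCount_count]
  rw [pvMapIdx (PySem.List.sorted order (fun x => x) false)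
        (fun v => ((((PySem.List.enumerate order).foldl (fun d p => d.insert p.2 p.1) PySem.Dict.empty).get? v).getD 0))]
  rw [Prod.mk.injEq]
  refine ⟨by simp, ?_⟩
  show 0 + _ = _
  rw [PySem.List.length_sorted]
  have h0 : (((order.length : Int)) - 0).toNat = order.length := by omega
  rw [h0, pvChooseTwo]
  ring

-- ===== VERDICT (by name: the statement is the Claim_ definition above) =====
theorem pairwise_counts_py_spec : Claim_equal_pairwise_counts_py := by
  intro order _
  unfold Spec_pairwise_counts_py
  exact pvAB_eq order
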